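-- pv_equiv track=rewrite | github.com/YosefQiu/MOPS | tutorial/pyMOPSAPI.py | _month_pairs_forward
-- ===== SOURCE A (Python) =====
-- def _month_pairs_forward(sy, sm, ey, em):
--     """
--     Generate monthly pairs for forward tracing:
--     [('YYYY-MM-01', 'YYYY-(MM+1)-01'), ...] until end month.
--
--     [('00sy-0sm-01','00sy-0sm+1-01'), ... , ('00ey-em-01','00ey-em+1-01')]
--     example: month_pairs_forward(18,1,20,12)
--     [('0018-01-01', '0018-02-01'), ..., ('0020-11-01', '0020-12-01')]
--     """
--     y, m = sy, sm
--     out = []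
--     while (y < ey) or (y == ey and m <= em):
--         by, bm = y, m+1
--         if bm == 13:
--             by, bm = y+1, 1
--         if (by > ey) or (by == ey and bm > em):
--             break
--         a = f"{y:04d}-{m:02d}-01"
--         b = f"{by:04d}-{bm:02d}-01"
--         out.append((a, b))
--         y, m = by, bm
--     return out
-- ===== SOURCE B (Python) =====
-- def _month_pairs_forward(sy, sm, ey, em):
--     # Stage 1: materialize the (year, month) state sequence of the walk.
--     # Stage 2: pair adjacent states with zip.
--     # Stage 3: format each pair of states into date strings.
--     def in_range(y, m):
--         return not (y > ey or (y == ey and m > em))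
--
--     def step(y, m):
--         return (y + 1, 1) if m == 12 else (y, m + 1)
--
--     states = []
--     y, m = sy, sm
--     while in_range(y, m):
--         states.append((y, m))
--         y, m = step(y, m)
--
--     def fmt(ym):
--         return f"{ym[0]:04d}-{ym[1]:02d}-01"
--
--     return [(fmt(p), fmt(q)) for p, q in zip(states, states[1:])]
-- ===== Notes on version B (the rewrite author's own statement) =====
-- stated objective: alternative
-- what changed: B runs three stages -- materialize the raw (year,month) state sequence of the walk, pair adjacent states with zip, then format each state pair into date strings -- instead of A's single loop that computes the successor, tests a break condition and emits each formatted pair inline.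
import Mathlib
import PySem

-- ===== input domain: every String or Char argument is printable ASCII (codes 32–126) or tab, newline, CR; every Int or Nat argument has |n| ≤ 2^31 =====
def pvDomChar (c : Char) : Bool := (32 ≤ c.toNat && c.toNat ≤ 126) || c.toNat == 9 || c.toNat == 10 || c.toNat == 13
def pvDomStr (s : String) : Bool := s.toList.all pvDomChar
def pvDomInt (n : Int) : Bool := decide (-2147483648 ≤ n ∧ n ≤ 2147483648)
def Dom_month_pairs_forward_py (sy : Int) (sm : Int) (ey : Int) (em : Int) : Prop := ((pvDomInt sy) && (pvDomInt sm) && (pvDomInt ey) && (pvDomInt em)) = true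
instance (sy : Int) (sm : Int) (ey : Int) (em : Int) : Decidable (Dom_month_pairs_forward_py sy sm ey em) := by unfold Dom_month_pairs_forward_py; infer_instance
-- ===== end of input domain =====

-- B materializes the raw (year,month) state sequence, pairs adjacent states with zip, and only
-- then formats each state pair into date strings, replacing A's single loop that computes the
-- successor, tests a break condition and emits each formatted pair inline (objective: alternative).
-- Both Python loops diverge when sm > 12 and sy < ey (the month never rolls over); the ports use
-- a fuel argument exceeding the iteration count on every input where the Pythons terminate.

-- fuel: a crude upper bound on the number of loop iterations whenever the Python loops terminate
def pvFuel (sy sm ey em : Int) : Nat :=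
  (12 - sm).toNat + (ey - sy).toNat * 12 + (em - sm).toNat + (em).toNat + 16

-- ===== PORT A =====
-- f"{n:04d}" / f"{n:02d}"  =  str(n).zfill(w) for integers (exact, sign in front)
def pvFmt (y : Int) (m : Int) : String :=
  PySem.Str.zfill (PySem.Int.toStr y) 4 ++ "-" ++ PySem.Str.zfill (PySem.Int.toStr m) 2 ++ "-01"

-- the while-condition of A
def pvCond (ey em y m : Int) : Bool := decide (y < ey) || (decide (y = ey) && decide (m ≤ em))

-- the month successor: by, bm = y, m+1; if bm == 13: by, bm = y+1, 1
def pvNext (y m : Int) : Int × Int := if m + 1 = 13 then (y + 1, 1) else (y, m + 1)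

-- A's while loop, step for step (append-loop as cons-recursion on fuel)
def pvLoopA (ey em : Int) : Nat → Int → Int → List (String × String)
  | 0, _, _ => []
  | f + 1, y, m =>
    if pvCond ey em y m then
      let n := pvNext y m
      if decide (ey < n.1) || (decide (n.1 = ey) && decide (em < n.2)) then []   -- break
      else (pvFmt y m, pvFmt n.1 n.2) :: pvLoopA ey em f n.1 n.2
    else []

def month_pairs_forward_py (sy : Int) (sm : Int) (ey : Int) (em : Int) : List (String × String) :=
  pvLoopA ey em (pvFuel sy sm ey em) sy sm

-- ===== PORT B =====
-- B's in_range test: not (y > ey or (y == ey and m > em))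
def pvInRangeB (ey em y m : Int) : Bool :=
  !(decide (ey < y) || (decide (y = ey) && decide (em < m)))

-- B's step: (y+1, 1) if m == 12 else (y, m+1)
def pvStepB (y m : Int) : Int × Int := if m = 12 then (y + 1, 1) else (y, m + 1)

-- Stage 1: the (year, month) state sequence of the walk
def pvStatesB (ey em : Int) : Nat → Int → Int → List (Int × Int)
  | 0, _, _ => []
  | f + 1, y, m =>
    if pvInRangeB ey em y m then (y, m) :: pvStatesB ey em f (pvStepB y m).1 (pvStepB y m).2
    else []

-- Stage 3: fmt(ym) of Source B
def pvFmtYM (ym : Int × Int) : String :=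
  PySem.Str.zfill (PySem.Int.toStr ym.1) 4 ++ "-" ++ PySem.Str.zfill (PySem.Int.toStr ym.2) 2 ++ "-01"

-- Stage 2 + 3: [(fmt(p), fmt(q)) for p, q in zip(states, states[1:])]
def month_pairs_forward_py_alt (sy : Int) (sm : Int) (ey : Int) (em : Int) : List (String × String) :=
  let states := pvStatesB ey em (pvFuel sy sm ey em + 1) sy sm
  (states.zip states.tail).map (fun pq => (pvFmtYM pq.1, pvFmtYM pq.2))

-- ===== PRECONDITION & SPEC =====
def Spec_month_pairs_forward_py (sy : Int) (sm : Int) (ey : Int) (em : Int) (out : List (String × String)) : Prop := out = month_pairs_forward_py_alt sy sm ey em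
instance (sy : Int) (sm : Int) (ey : Int) (em : Int) (out : List (String × String)) : Decidable (Spec_month_pairs_forward_py sy sm ey em out) := by unfold Spec_month_pairs_forward_py; infer_instance

-- ===== CLAIM =====
def Claim_equal_month_pairs_forward_py : Prop := ∀ (sy : Int) (sm : Int) (ey : Int) (em : Int), Dom_month_pairs_forward_py sy sm ey em → Spec_month_pairs_forward_py sy sm ey em (month_pairs_forward_py sy sm ey em)

-- ===== LEMMAS AND PROOFS =====
-- B's in_range equals A's while-condition
theorem pvInRangeB_eq_cond (ey em y m : Int) : pvInRangeB ey em y m = pvCond ey em y m := by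
  rcases lt_trichotomy y ey with h | h | h
  · have h1 : ¬ ey < y := by omega
    have h2 : y ≠ ey := by omega
    simp [pvInRangeB, pvCond, h, h1, h2]
  · subst h
    by_cases h3 : m ≤ em
    · have h4 : ¬ em < m := by omega
      simp [pvInRangeB, pvCond, h3, h4]
    · have h4 : em < m := by omega
      simp [pvInRangeB, pvCond, h3, h4]
  · have h1 : ¬ y < ey := by omega
    have h2 : y ≠ ey := by omega
    simp [pvInRangeB, pvCond, h, h1, h2]
-- B's step equals A's successor
theorem pvStepB_eq_next (y m : Int) : pvStepB y m = pvNext y m := by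
  unfold pvStepB pvNext
  by_cases h : m = 12
  · simp [h]
  · have h2 : ¬ m + 1 = 13 := by omega
    simp [h, h2]

theorem pvStatesB_nil (ey em : Int) (f : Nat) (y m : Int) (h : pvInRangeB ey em y m = false) :
    pvStatesB ey em f y m = [] := by
  cases f with
  | zero => rfl
  | succ f => simp [pvStatesB, h]

-- A's break test equals the negation of the while condition
theorem pvBreak_eq (ey em y m : Int) :
    (decide (ey < y) || (decide (y = ey) && decide (em < m))) = !pvCond ey em y m := by
  rw [← pvInRangeB_eq_cond]
  simp [pvInRangeB]

theorem pvLoopA_eq_alt (ey em : Int) (f : Nat) (y m : Int) :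
    pvLoopA ey em f y m =
      ((pvStatesB ey em (f + 1) y m).zip (pvStatesB ey em (f + 1) y m).tail).map
        (fun pq => (pvFmtYM pq.1, pvFmtYM pq.2)) := by
  induction f generalizing y m with
  | zero =>
    by_cases h : pvInRangeB ey em y m = true <;>
      simp [pvLoopA, pvStatesB, h]
  | succ f ih =>
    by_cases h : pvInRangeB ey em y m = true
    · have hc : pvCond ey em y m = true := by rw [← pvInRangeB_eq_cond]; exact h
      by_cases h2 : pvInRangeB ey em (pvNext y m).1 (pvNext y m).2 = true
      · have hbr : (decide (ey < (pvNext y m).1) ||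
            (decide ((pvNext y m).1 = ey) && decide (em < (pvNext y m).2))) = false := by
          rw [pvBreak_eq, ← pvInRangeB_eq_cond, h2]; rfl
        have e1 : pvStatesB ey em (f + 1 + 1) y m
            = (y, m) :: pvStatesB ey em (f + 1) (pvNext y m).1 (pvNext y m).2 := by
          simp [pvStatesB, h, pvStepB_eq_next]
        have e2 : pvStatesB ey em (f + 1) (pvNext y m).1 (pvNext y m).2
            = ((pvNext y m).1, (pvNext y m).2) ::
              pvStatesB ey em f (pvStepB (pvNext y m).1 (pvNext y m).2).1
                (pvStepB (pvNext y m).1 (pvNext y m).2).2 := by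
          simp [pvStatesB, h2]
        have hih := ih (pvNext y m).1 (pvNext y m).2
        rw [e2, List.tail_cons] at hih
        simp only [pvLoopA, hc, if_true, hbr, Bool.false_eq_true, if_false]
        rw [e1, e2, List.tail_cons, List.zip_cons_cons, List.map_cons, hih]
        rfl
      · have h2' : pvInRangeB ey em (pvNext y m).1 (pvNext y m).2 = false := by
          cases hx : pvInRangeB ey em (pvNext y m).1 (pvNext y m).2 <;> simp_all
        have hbr : (decide (ey < (pvNext y m).1) ||
            (decide ((pvNext y m).1 = ey) && decide (em < (pvNext y m).2))) = true := by
          rw [pvBreak_eq, ← pvInRangeB_eq_cond, h2']; rfl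
        simp [pvLoopA, pvStatesB, hc, h, hbr, pvStepB_eq_next, h2']
    · have h' : pvInRangeB ey em y m = false := by
        cases hx : pvInRangeB ey em y m <;> simp_all
      have hc : pvCond ey em y m = false := by rw [← pvInRangeB_eq_cond]; exact h'
      simp [pvLoopA, hc, pvStatesB_nil ey em _ y m h']

-- ===== VERDICT =====
theorem month_pairs_forward_py_spec : Claim_equal_month_pairs_forward_py := by
  intro sy sm ey em _
  unfold Spec_month_pairs_forward_py month_pairs_forward_py month_pairs_forward_py_alt
  exact pvLoopA_eq_alt ey em (pvFuel sy sm ey em) sy sm
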